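-- pv_equiv track=rewrite | github.com/HugoSenetaire/SelfNormalizedLikelihood | UtilsPlot/utils_plot/utils.py | create_dictionnary_params
-- ===== SOURCE A (Python) =====
-- liste_of_params = ['base_dist', "training_type", "network", "optimizer", "proposal", "seed", "lightning_logs", "version", ]
--
-- def create_dictionnary_params(list_dir, results_dir):
--     nb_parameter = list_dir[0].strip(results_dir).count("/")
--     dictionnary_params = {key: [] for key in liste_of_params[:nb_parameter]}
--     dictionnary_params['folder_event'] = []
--     for path in list_dir :
--         if 'seed' not in path :
--             continue
--         current_nb_parameter = path.strip(results_dir).count("/")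
--         list_param = path.strip(results_dir).split("/")
--         assert not (current_nb_parameter>len(liste_of_params)), f"The number of parameter {current_nb_parameter} is not the same as the number of parameter in the list {len(liste_of_params)}"
--         if current_nb_parameter < nb_parameter :
--             list_param = ['None']*(nb_parameter-current_nb_parameter) + list_param
--         for key, param in zip(liste_of_params[:nb_parameter], list_param) :
--             dictionnary_params[key].append(param)
--         dictionnary_params['folder_event'].append(path.strip("hparams.yaml"))
--     return dictionnary_params
-- ===== SOURCE B (Python) =====
-- liste_of_params = ['base_dist', "training_type", "network", "optimizer", "proposal", "seed", "lightning_logs", "version", ]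
--
-- def create_dictionnary_params(list_dir, results_dir):
--     nb_parameter = list_dir[0].strip(results_dir).count("/")
--     keys = liste_of_params[:nb_parameter]
--     rows = []
--     folders = []
--     for path in list_dir:
--         if 'seed' not in path:
--             continue
--         stripped = path.strip(results_dir)
--         current_nb_parameter = stripped.count("/")
--         assert not (current_nb_parameter > len(liste_of_params)), f"The number of parameter {current_nb_parameter} is not the same as the number of parameter in the list {len(liste_of_params)}"
--         row = stripped.split("/")
--         if current_nb_parameter < nb_parameter:
--             row = ['None'] * (nb_parameter - current_nb_parameter) + row
--         rows.append(row)
--         folders.append(path.strip("hparams.yaml"))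
--     out = {key: [row[i] for row in rows] for i, key in enumerate(keys)}
--     out['folder_event'] = folders
--     return out
-- ===== Notes on version B (the rewrite author's own statement) =====
-- stated objective: alternative
-- what changed: A appends each parameter into per-key dict lists inside a nested zip loop; B makes one filtering pass that builds a row table plus the folder list and then pivots the table into columns with a dict comprehension.
import Mathlib
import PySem

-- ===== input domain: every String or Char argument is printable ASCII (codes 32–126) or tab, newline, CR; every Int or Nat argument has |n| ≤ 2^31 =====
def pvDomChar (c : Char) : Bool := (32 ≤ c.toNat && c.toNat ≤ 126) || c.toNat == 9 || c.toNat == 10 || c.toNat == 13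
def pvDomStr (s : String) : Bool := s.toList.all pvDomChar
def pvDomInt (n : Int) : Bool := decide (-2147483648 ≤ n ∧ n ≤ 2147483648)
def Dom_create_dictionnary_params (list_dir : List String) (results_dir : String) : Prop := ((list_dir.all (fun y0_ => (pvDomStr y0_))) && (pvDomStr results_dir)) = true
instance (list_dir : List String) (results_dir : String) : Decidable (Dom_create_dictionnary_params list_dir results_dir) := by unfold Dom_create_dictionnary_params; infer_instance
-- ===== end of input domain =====

-- B replaces A's per-key dict-append loop by one filtering pass that collects a row table and the
-- folder strings, then pivots the table into columns; same cost, different decomposition (alternative).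

-- the module-level constant liste_of_params (shared context of both implementations)
def pvListeOfParams : List String :=
  ["base_dist", "training_type", "network", "optimizer", "proposal", "seed", "lightning_logs", "version"]

-- ===== PORT A =====
def create_dictionnary_params (list_dir : List String) (results_dir : String) : List (String × List String) :=
  -- list_dir[0] raises IndexError on []: such inputs are excluded by Pre_; headD "" is exact on nonempty input
  let nb_parameter := PySem.Str.count (PySem.Str.stripChars (list_dir.headD "") results_dir) "/"
  let d0 : PySem.Dict String (List String) :=
    ((PySem.List.slice pvListeOfParams none (some (nb_parameter : Int))).foldl
      (fun d key => d.insert key []) PySem.Dict.empty).insert "folder_event" []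
  let d := list_dir.foldl (fun d path =>
    if PySem.Str.isIn "seed" path then
      -- the assert fails (AssertionError) iff this count exceeds 8: such inputs are excluded by Pre_
      let current_nb_parameter := PySem.Str.count (PySem.Str.stripChars path results_dir) "/"
      -- split? is none only for an empty separator; "/" is nonempty, so .getD [] is exact
      let list_param0 := (PySem.Str.split? (PySem.Str.stripChars path results_dir) "/").getD []
      let list_param :=
        if current_nb_parameter < nb_parameter then
          List.replicate (nb_parameter - current_nb_parameter) "None" ++ list_param0
        else list_param0
      let d := ((PySem.List.slice pvListeOfParams none (some (nb_parameter : Int))).zip list_param).foldl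
        (fun d kv => d.modify kv.1 [] (fun v => v ++ [kv.2])) d
      d.modify "folder_event" [] (fun v => v ++ [PySem.Str.stripChars path "hparams.yaml"])
    else d) d0
  d.items

-- ===== PORT B =====
def create_dictionnary_params_alt (list_dir : List String) (results_dir : String) : List (String × List String) :=
  -- list_dir[0] raises IndexError on []: excluded by Pre_; headD "" is exact on nonempty input
  let nb_parameter := PySem.Str.count (PySem.Str.stripChars (list_dir.headD "") results_dir) "/"
  let keys := PySem.List.slice pvListeOfParams none (some (nb_parameter : Int))
  -- one filtering pass: collect the padded rows and the folder strings
  let table := list_dir.foldl (fun (acc : List (List String) × List String) path =>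
    if PySem.Str.isIn "seed" path then
      let current := PySem.Str.count (PySem.Str.stripChars path results_dir) "/"
      -- split? is none only for an empty separator; "/" is nonempty, so .getD [] is exact
      let row0 := (PySem.Str.split? (PySem.Str.stripChars path results_dir) "/").getD []
      let row := if current < nb_parameter then
          List.replicate (nb_parameter - current) "None" ++ row0
        else row0
      (acc.1 ++ [row], acc.2 ++ [PySem.Str.stripChars path "hparams.yaml"])
    else acc) ([], [])
  -- pivot: row[i] is always in range (every row has more than nb_parameter ≥ i entries), so pyGetD is exact
  ((PySem.List.enumerate keys).map
      (fun ik => (ik.2, table.1.map (fun row => PySem.List.pyGetD row ik.1 ""))))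
    ++ [("folder_event", table.2)]

-- ===== PRECONDITION & SPEC =====
-- Pre_ excludes exactly the inputs where Python A raises: the empty list (IndexError on list_dir[0]) and
-- lists holding a path that contains 'seed' whose stripped form has more than 8 '/' (AssertionError).
def Pre_create_dictionnary_params (list_dir : List String) (results_dir : String) : Prop :=
  list_dir ≠ [] ∧ ∀ p ∈ list_dir, PySem.Str.isIn "seed" p = true →
    PySem.Str.count (PySem.Str.stripChars p results_dir) "/" ≤ 8
instance (list_dir : List String) (results_dir : String) : Decidable (Pre_create_dictionnary_params list_dir results_dir) := by unfold Pre_create_dictionnary_params; infer_instance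

def pvWitness_create_dictionnary_params : List String × String := (["results/seed1/v0"], "results")

def Spec_create_dictionnary_params (list_dir : List String) (results_dir : String) (out : List (String × List String)) : Prop := out = create_dictionnary_params_alt list_dir results_dir
instance (list_dir : List String) (results_dir : String) (out : List (String × List String)) : Decidable (Spec_create_dictionnary_params list_dir results_dir out) := by unfold Spec_create_dictionnary_params; infer_instance

-- ===== CLAIM (what is proved, stated in full; the proofs are below) =====
def Claim_equal_create_dictionnary_params : Prop := ∀ (list_dir : List String) (results_dir : String), Dom_create_dictionnary_params list_dir results_dir → Pre_create_dictionnary_params list_dir results_dir → Spec_create_dictionnary_params list_dir results_dir (create_dictionnary_params list_dir results_dir)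

-- ===== LEMMAS AND PROOFS =====

-- proof-side names for the shared ingredients of the two loop bodies
def pvNb (list_dir : List String) (results_dir : String) : Nat :=
  PySem.Str.count (PySem.Str.stripChars (list_dir.headD "") results_dir) "/"
def pvSel (list_dir : List String) : List String :=
  list_dir.filter (fun p => PySem.Str.isIn "seed" p)
def pvRow (results_dir : String) (nb : Nat) (p : String) : List String :=
  let cur := PySem.Str.count (PySem.Str.stripChars p results_dir) "/"
  let r0 := (PySem.Str.split? (PySem.Str.stripChars p results_dir) "/").getD []
  if cur < nb then List.replicate (nb - cur) "None" ++ r0 else r0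
def pvFolder (p : String) : String := PySem.Str.stripChars p "hparams.yaml"
def pvKeysI (list_dir : List String) (results_dir : String) : List String :=
  PySem.List.slice pvListeOfParams none (some ((pvNb list_dir results_dir : Nat) : Int))
def pvGmod : PySem.Dict String (List String) → String × String → PySem.Dict String (List String) :=
  fun d kv => d.modify kv.1 [] (fun v => v ++ [kv.2])
def pvD0 (list_dir : List String) (results_dir : String) : PySem.Dict String (List String) :=
  ((pvKeysI list_dir results_dir).foldl (fun d key => d.insert key []) PySem.Dict.empty).insert
    "folder_event" []

-- lockstep relation of the two fuel loops behind s.count and s.split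
theorem pv_countgo_eq (sep : List Char) (hsep : sep ≠ []) :
    ∀ n (l : List Char) (fuel acc : Nat), l.length = n → l.length ≤ fuel →
      PySem.Chars.count.go sep fuel l acc = acc + PySem.Chars.count l sep := by
  intro n
  induction n using Nat.strong_induction_on with
  | _ n ih =>
    intro l fuel acc hn hf
    have hsl : 1 ≤ sep.length := List.length_pos_iff.mpr hsep
    match fuel, l with
    | 0, l =>
      have : l = [] := List.eq_nil_of_length_eq_zero (Nat.le_zero.mp hf)
      subst this
      simp [PySem.Chars.count.go, PySem.Chars.count, hsep]
    | fuel+1, [] =>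
      simp [PySem.Chars.count.go, PySem.Chars.count, hsep]
    | fuel+1, c :: rest =>
      simp only [List.length_cons] at hn hf
      have hd : ((c :: rest).drop sep.length).length = rest.length + 1 - sep.length := by
        simp [List.length_drop]
      rw [PySem.Chars.count.go]
      have hcount : PySem.Chars.count (c :: rest) sep =
          PySem.Chars.count.go sep (rest.length + 1) (c :: rest) 0 := by
        simp [PySem.Chars.count, hsep]
      by_cases hp : sep.isPrefixOf (c :: rest) = true
      · simp only [hp, if_pos]
        rw [ih (((c :: rest).drop sep.length).length) (by omega) _ fuel (acc+1) rfl (by omega)]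
        rw [hcount, PySem.Chars.count.go]
        simp only [hp, if_pos]
        rw [ih (((c :: rest).drop sep.length).length) (by omega) _ rest.length 1 rfl (by omega)]
        omega
      · simp only [hp, if_neg, Bool.false_eq_true, not_false_iff]
        rw [ih rest.length (by omega) rest fuel acc rfl (by omega)]
        rw [hcount, PySem.Chars.count.go]
        simp only [hp, if_neg, Bool.false_eq_true, not_false_iff]
        rw [ih rest.length (by omega) rest rest.length 0 rfl (by omega)]
        omega

theorem pv_splitgo_len (sep : List Char) (hsep : sep ≠ []) :
    ∀ n (l : List Char) (fuel : Nat) (cur : List Char) (acc : List (List Char)), l.length = n → l.length ≤ fuel →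
      (PySem.Chars.splitOn.go sep fuel l cur acc).length = acc.length + 1 + PySem.Chars.count l sep := by
  intro n
  induction n using Nat.strong_induction_on with
  | _ n ih =>
    intro l fuel cur acc hn hf
    have hsl : 1 ≤ sep.length := List.length_pos_iff.mpr hsep
    match fuel, l with
    | 0, l =>
      have : l = [] := List.eq_nil_of_length_eq_zero (Nat.le_zero.mp hf)
      subst this
      simp [PySem.Chars.splitOn.go, PySem.Chars.count, hsep, PySem.Chars.count.go]
    | fuel+1, [] =>
      simp [PySem.Chars.splitOn.go, PySem.Chars.count, hsep, PySem.Chars.count.go]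
    | fuel+1, c :: rest =>
      simp only [List.length_cons] at hn hf
      have hcount : PySem.Chars.count (c :: rest) sep =
          PySem.Chars.count.go sep (rest.length + 1) (c :: rest) 0 := by
        simp [PySem.Chars.count, hsep]
      rw [PySem.Chars.splitOn.go]
      by_cases hp : sep.isPrefixOf (c :: rest) = true
      · simp only [hp, if_pos]
        rw [ih (((c :: rest).drop sep.length).length) (by simp [List.length_drop]; omega) _ fuel []
          (cur.reverse :: acc) rfl (by simp [List.length_drop]; omega)]
        rw [hcount, PySem.Chars.count.go]
        simp only [hp, if_pos]
        rw [pv_countgo_eq sep hsep (((c :: rest).drop sep.length).length) _ rest.length 1 rfl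
          (by simp [List.length_drop]; omega)]
        simp; omega
      · simp only [hp, if_neg, Bool.false_eq_true, not_false_iff]
        rw [ih rest.length (by omega) rest fuel (c :: cur) acc rfl (by omega)]
        rw [hcount, PySem.Chars.count.go]
        simp only [hp, if_neg, Bool.false_eq_true, not_false_iff]
        rw [pv_countgo_eq sep hsep rest.length rest rest.length 0 rfl (by omega)]
        omega

-- s.split("/") has one more piece than occurrences of "/"
theorem pv_split_len (s : String) :
    ((PySem.Str.split? s "/").getD []).length = PySem.Str.count s "/" + 1 := by
  have h := PySem.Str.split?_map s "/"
  have hsep : ("/" : String).toList = ['/'] := by decide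
  cases hs : PySem.Str.split? s "/" with
  | none => rw [hs] at h; rw [hsep] at h; simp [PySem.Chars.split?] at h
  | some parts =>
    rw [hs] at h; rw [hsep] at h; simp [PySem.Chars.split?] at h
    have hl : parts.length = (PySem.Chars.splitOn s.toList ['/']).length := by
      rw [← h]; simp
    have hgo := pv_splitgo_len ['/'] (by simp) s.toList.length s.toList (s.toList.length + 1) [] []
      rfl (by omega)
    rw [Option.getD_some, PySem.Str.count_eq, hsep, hl, PySem.Chars.splitOn, hgo]
    simp; omega

theorem pv_row_len (results_dir : String) (nb : Nat) (p : String) :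
    nb < (pvRow results_dir nb p).length := by
  unfold pvRow
  have h := pv_split_len (PySem.Str.stripChars p results_dir)
  by_cases hc : PySem.Str.count (PySem.Str.stripChars p results_dir) "/" < nb
  · simp only [hc, if_pos, List.length_append, List.length_replicate, h]
    omega
  · simp only [hc, if_neg, not_false_iff, h]
    omega

theorem pv_set_update_noop {s : PySem.Set String} {xs : List String}
    (h : ∀ x ∈ xs, x ∈ s) : PySem.Set.update s xs = s := by
  induction xs generalizing s with
  | nil => rfl
  | cons x xs ih =>
    have hx : PySem.Set.contains s x = true := by
      simp [PySem.Set.contains]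
      exact h x (by simp)
    simp only [PySem.Set.update, List.foldl_cons, PySem.Set.add, hx]
    exact ih (fun y hy => h y (by simp [hy]))

theorem pv_set_update_fresh : ∀ (xs : List String) (s : PySem.Set String),
    xs.Nodup → (∀ x ∈ xs, x ∉ s) → PySem.Set.update s xs = s ++ xs := by
  intro xs
  induction xs with
  | nil => intro s _ _; simp [PySem.Set.update]
  | cons x xs ih =>
    intro s hnd hf
    have hx : PySem.Set.contains s x = false := by
      simp [PySem.Set.contains]
      exact hf x (by simp)
    simp only [PySem.Set.update, List.foldl_cons, PySem.Set.add, hx]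
    have := ih (s ++ [x]) hnd.of_cons (by
      intro y hy
      simp only [List.mem_append, List.mem_singleton]
      rintro (h1 | rfl)
      · exact hf y (by simp [hy]) h1
      · exact (List.nodup_cons.mp hnd).1 hy)
    simp only [PySem.Set.update] at this
    simp [this]

theorem pv_zip_filter_nil (k : String) : ∀ (ks vs : List String), k ∉ ks →
    (ks.zip vs).filter (fun kv => kv.1 == k) = [] := by
  intro ks
  induction ks with
  | nil => simp
  | cons a ks ih =>
    intro vs hk
    cases vs with
    | nil => simp
    | cons v vs =>
      simp only [List.zip_cons_cons, List.filter_cons]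
      have : (a == k) = false := by
        simp only [beq_eq_false_iff_ne]; rintro rfl; exact hk (by simp)
      simp only [this, Bool.false_eq_true, if_neg, not_false_iff]
      exact ih vs (fun h => hk (by simp [h]))

-- with distinct keys the zip holds exactly one pair at the i-th key
theorem pv_zip_filter_singleton : ∀ (ks vs : List String), ks.Nodup →
    ∀ (i : Nat) (h : i < ks.length), i < vs.length →
      (ks.zip vs).filter (fun kv => kv.1 == ks[i]) = [(ks[i], vs.getD i "")] := by
  intro ks
  induction ks with
  | nil => intro vs _ i h; simp at h
  | cons a ks ih =>
    intro vs hnd i h hv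
    cases vs with
    | nil => simp at hv
    | cons v vs =>
      cases i with
      | zero =>
        simp only [List.zip_cons_cons, List.filter_cons, List.getElem_cons_zero, beq_self_eq_true,
          if_pos, List.getD_cons_zero]
        rw [pv_zip_filter_nil a ks vs (List.nodup_cons.mp hnd).1]
      | succ i =>
        have hi : i < ks.length := by simpa using h
        simp only [List.zip_cons_cons, List.filter_cons, List.getElem_cons_succ, List.getD_cons_succ]
        have hmem : ks[i] ∈ ks := List.getElem_mem hi
        have : (a == ks[i]) = false := by
          simp only [beq_eq_false_iff_ne]; rintro rfl; exact (List.nodup_cons.mp hnd).1 hmem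
        simp only [this, Bool.false_eq_true, if_neg, not_false_iff]
        exact ih vs (List.nodup_cons.mp hnd).2 i hi (by simpa using hv)

theorem pv_getD_foldl_insert_nil (l : List String) :
    ∀ (d : PySem.Dict String (List String)), (∀ c, d.getD c [] = []) →
      ∀ c, (l.foldl (fun d k => d.insert k []) d).getD c [] = [] := by
  induction l with
  | nil => intro d h c; exact h c
  | cons k l ih =>
    intro d h c
    simp only [List.foldl_cons]
    refine ih _ (fun c' => ?_) c
    rw [PySem.Dict.getD_insert]
    split <;> simp [h]

theorem pv_flatMap_single {α β : Type} (l : List α) (f : α → β) :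
    l.flatMap (fun p => [f p]) = l.map f := by
  induction l with
  | nil => rfl
  | cons x l ih => simp [ih]

theorem pv_keysI_props (ld : List String) (rd : String) :
    (pvKeysI ld rd).Nodup ∧ "folder_event" ∉ pvKeysI ld rd ∧
      (pvKeysI ld rd).length ≤ pvNb ld rd := by
  have hsl : pvKeysI ld rd = pvListeOfParams.take (pvNb ld rd) := by
    unfold pvKeysI
    rw [PySem.List.slice_to _ (by positivity)]
    rw [Int.toNat_natCast]
  rw [hsl]
  refine ⟨(List.take_sublist _ _).nodup (by decide), ?_, ?_⟩
  · intro h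
    exact (by decide : "folder_event" ∉ pvListeOfParams) (List.take_subset _ _ h)
  · rw [List.length_take]; omega

set_option maxHeartbeats 400000 in
theorem pv_main (ld : List String) (rd : String) :
    create_dictionnary_params ld rd = create_dictionnary_params_alt ld rd := by
  obtain ⟨hknd, hfe, hklen⟩ := pv_keysI_props ld rd
  have hAport : create_dictionnary_params ld rd = (ld.foldl (fun d path =>
        if PySem.Str.isIn "seed" path then
          (((pvKeysI ld rd).zip (pvRow rd (pvNb ld rd) path)).foldl pvGmod d).modify
            "folder_event" [] (fun v => v ++ [pvFolder path])
        else d) (pvD0 ld rd)).items := rfl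
  have hBport : create_dictionnary_params_alt ld rd = ((PySem.List.enumerate (pvKeysI ld rd)).map
          (fun ik => (ik.2, (ld.foldl (fun (acc : List (List String) × List String) path =>
            if PySem.Str.isIn "seed" path then
              (acc.1 ++ [pvRow rd (pvNb ld rd) path], acc.2 ++ [pvFolder path]) else acc)
            ([], [])).1.map (fun row => PySem.List.pyGetD row ik.1 ""))))
        ++ [("folder_event", (ld.foldl (fun (acc : List (List String) × List String) path =>
            if PySem.Str.isIn "seed" path then
              (acc.1 ++ [pvRow rd (pvNb ld rd) path], acc.2 ++ [pvFolder path]) else acc)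
            ([], [])).2)] := rfl
  rw [hAport, hBport]
  set nb := pvNb ld rd with hnb
  set keys := pvKeysI ld rd with hkeys
  -- B's single pass collects the rows and the folder strings
  have hB : ∀ (l : List String) (a : List (List String)) (b : List String),
      l.foldl (fun (acc : List (List String) × List String) path =>
        if PySem.Str.isIn "seed" path then
          (acc.1 ++ [pvRow rd nb path], acc.2 ++ [pvFolder path]) else acc) (a, b)
      = (a ++ (pvSel l).map (pvRow rd nb), b ++ (pvSel l).map pvFolder) := by
    intro l
    induction l with
    | nil => intro a b; simp [pvSel]
    | cons p l ih =>
      intro a b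
      simp only [List.foldl_cons, pvSel, List.filter_cons]
      by_cases hp : PySem.Str.isIn "seed" p = true
      · rw [if_pos hp, if_pos hp, ih, List.map_cons, List.map_cons]
        simp only [List.append_assoc, List.singleton_append]
        rfl
      · rw [if_neg hp, if_neg hp, ih]
        rfl
  have hB0 := hB ld [] []
  simp only [List.nil_append] at hB0
  rw [hB0]
  -- A's loop is one fold of modifies over the flattened pair list L
  rw [← List.foldl_filter]
  have hbody : (fun (d : PySem.Dict String (List String)) p =>
      ((keys.zip (pvRow rd nb p)).foldl pvGmod d).modify
        "folder_event" [] (fun v => v ++ [pvFolder p]))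
      = (fun d p => ((keys.zip (pvRow rd nb p)) ++ [("folder_event", pvFolder p)]).foldl pvGmod d) := by
    funext d p
    simp [List.foldl_append, pvGmod]
  rw [hbody, show (ld.filter (fun p => PySem.Str.isIn "seed" p)) = pvSel ld from rfl,
    ← List.foldl_flatMap]
  set L := (pvSel ld).flatMap
    (fun p => keys.zip (pvRow rd nb p) ++ [("folder_event", pvFolder p)]) with hL
  -- keys and lookups of the final dict
  have hd0keys : (pvD0 ld rd).keys = keys ++ ["folder_event"] := by
    unfold pvD0
    have hbase : ((pvKeysI ld rd).foldl
        (fun (d : PySem.Dict String (List String)) key => d.insert key []) PySem.Dict.empty).keys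
        = keys := by
      rw [PySem.Dict.keys_foldl_insert _ (fun _ _ => []) _]
      rw [PySem.Dict.keys_empty]
      rw [pv_set_update_fresh _ _ hknd (by intro x _ hx; simp at hx)]
      simp [hkeys]
    rw [PySem.Dict.keys_insert_of_not_contains, hbase]
    rw [PySem.Dict.contains_eq_decide_mem_keys, hbase]
    simpa using hfe
  have hd0getD : ∀ c, (pvD0 ld rd).getD c [] = [] := by
    intro c
    unfold pvD0
    rw [PySem.Dict.getD_insert]
    split
    · rfl
    · exact pv_getD_foldl_insert_nil _ PySem.Dict.empty (fun c' => by simp) c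
  have hd0nd : (pvD0 ld rd).keys.Nodup := by
    rw [hd0keys]
    refine List.Nodup.append hknd (List.nodup_singleton _) ?_
    intro x hx hmem
    rw [List.mem_singleton] at hmem
    subst hmem
    exact hfe hx
  have hdkeys : (L.foldl pvGmod (pvD0 ld rd)).keys = keys ++ ["folder_event"] := by
    show (L.foldl (fun d kv => d.modify kv.1 [] (fun v => v ++ [kv.2])) (pvD0 ld rd)).keys = _
    rw [PySem.Dict.keys_foldl_modify_key L Prod.fst [] (fun _ kv v => v ++ [kv.2])]
    rw [hd0keys]
    refine pv_set_update_noop ?_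
    intro x hx
    simp only [List.mem_map] at hx
    obtain ⟨kv, hkv, rfl⟩ := hx
    rw [hL] at hkv
    simp only [List.mem_flatMap, List.mem_append, List.mem_singleton] at hkv
    obtain ⟨p, _, (hz | rfl)⟩ := hkv
    · exact List.mem_append_left _ ((List.of_mem_zip hz).1)
    · simp
  have hdnd : (L.foldl pvGmod (pvD0 ld rd)).keys.Nodup := by
    rw [hdkeys]; rw [← hd0keys]; exact hd0nd
  have hgd : ∀ c, (L.foldl pvGmod (pvD0 ld rd)).getD c []
      = (L.filter (fun p => p.1 == c)).map (fun p => p.2) := by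
    intro c
    show (L.foldl (fun d kv => d.modify kv.1 [] (fun v => v ++ [kv.2])) (pvD0 ld rd)).getD c [] = _
    rw [PySem.Dict.getD_foldl_modify_append, hd0getD]
    simp
  -- items of the final dict, column by column
  rw [PySem.Dict.items_eq_map_keys _ hdnd [], hdkeys, List.map_append]
  simp only [List.map_cons, List.map_nil, hgd]
  refine congrArg₂ (· ++ ·) ?_ ?_
  · -- the key columns, index by index
    apply List.ext_getElem
    · rw [List.length_map, List.length_map, PySem.List.length_enumerate]
    · intro i h1 h2
      have hi : i < keys.length := by
        rwa [List.length_map, PySem.List.length_enumerate] at h2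
      simp only [List.getElem_map, PySem.List.getElem_enumerate, zero_add]
      rw [List.filter_flatMap]
      have hper : (fun p => (keys.zip (pvRow rd nb p) ++ [("folder_event", pvFolder p)]).filter
          (fun q => q.1 == keys[i]))
          = fun p => [(keys[i], (pvRow rd nb p).getD i "")] := by
        funext p
        rw [List.filter_append,
          pv_zip_filter_singleton keys (pvRow rd nb p) hknd i hi
            (by have := pv_row_len rd nb p; omega)]
        have : (("folder_event" : String) == keys[i]) = false := by
          simp only [beq_eq_false_iff_ne]
          intro h
          exact hfe (h ▸ List.getElem_mem hi)
        simp [this]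
      rw [hper, pv_flatMap_single, List.map_map, List.map_map]
      refine congrArg (Prod.mk keys[i]) ?_
      apply List.map_congr_left
      intro p _
      simp only [Function.comp_apply]
      rw [PySem.List.pyGetD_natCast]
  · -- the folder_event column
    refine congrArg (fun v => [(("folder_event" : String), v)]) ?_
    rw [List.filter_flatMap]
    have hper : (fun p => (keys.zip (pvRow rd nb p) ++ [("folder_event", pvFolder p)]).filter
        (fun q => q.1 == "folder_event"))
        = fun p => [(("folder_event" : String), pvFolder p)] := by
      funext p
      rw [List.filter_append, pv_zip_filter_nil _ _ _ hfe]
      simp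
    rw [hper, pv_flatMap_single, List.map_map]
    simp [Function.comp]

-- ===== VERDICT (by name: the statement is the Claim_ definition above) =====
theorem create_dictionnary_params_spec : Claim_equal_create_dictionnary_params := by
  intro ld rd _ _
  unfold Spec_create_dictionnary_params
  exact pv_main ld rd
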